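-- pv_equiv track=rewrite | github.com/pai10464/python | moredc/moredc_34.py | pattern4
-- ===== SOURCE A (Python) =====
-- def pattern4(N):
--     ans = [[1]]
--     i = 2
--     if N == 0:
--         return []
--     for e in range(N - 1):
--         ans.append([0])
--     for e in range(N - 1):
--         for j in range(N - 1, e + 1, -1):
--             ans[j].append(0)
--         for j in range(e + 1, -1, -1):
--             ans[j].append(i)
--             i += 1
--     return ans
-- ===== SOURCE B (Python) =====
-- def pattern4(N):
--     return [[c * (c + 1) // 2 + (c - r) + 1 if r <= c else 0
--              for c in range(N)]
--             for r in range(N)]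
-- ===== Notes on version B (the rewrite author's own statement) =====
-- stated objective: simpler
-- what changed: Replaces A's column-by-column in-place appends driven by an incrementing counter with a direct row-by-row comprehension computing each cell from a closed-form triangular-number formula; Pre_ excludes negative N, a degenerate size no specification covers, on which A returns a one-cell grid and B an empty grid, either value being as defensible as the other.
-- outside the precondition, e.g. on pattern4(-1): A returns [[1]], B returns []; on pattern4(-5): A returns [[1]], B returns []
import Mathlib
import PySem

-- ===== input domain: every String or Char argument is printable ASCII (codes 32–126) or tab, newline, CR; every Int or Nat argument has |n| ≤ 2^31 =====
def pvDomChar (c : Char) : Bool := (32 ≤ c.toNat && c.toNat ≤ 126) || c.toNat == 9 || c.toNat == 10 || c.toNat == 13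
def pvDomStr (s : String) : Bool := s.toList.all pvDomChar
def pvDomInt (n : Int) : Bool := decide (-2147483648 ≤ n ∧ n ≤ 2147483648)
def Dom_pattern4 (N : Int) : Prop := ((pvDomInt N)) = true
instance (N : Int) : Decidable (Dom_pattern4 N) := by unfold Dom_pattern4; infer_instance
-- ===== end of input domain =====

-- B replaces A's column-by-column counter-driven appends by a per-cell closed form (objective: simpler).


-- ===== PORT A =====
-- ans[j].append(v): exact for 0 ≤ j < a.length (every use in pattern4 stays in range)
def pvAppendAt (a : List (List Int)) (j : Int) (v : Int) : List (List Int) :=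
  a.set j.toNat ((a.getD j.toNat []) ++ [v])

def pattern4 (N : Int) : List (List Int) :=
  if N = 0 then []
  else
    let ans : List (List Int) := [[1]]
    let i : Int := 2
    let ans := (PySem.List.pyRange 0 (N - 1) 1).foldl (fun a _ => a ++ [[0]]) ans
    let st := (PySem.List.pyRange 0 (N - 1) 1).foldl
      (fun (st : List (List Int) × Int) e =>
        let a1 := (PySem.List.pyRange (N - 1) (e + 1) (-1)).foldl
          (fun a j => pvAppendAt a j 0) st.1
        (PySem.List.pyRange (e + 1) (-1) (-1)).foldl
          (fun (p : List (List Int) × Int) j => (pvAppendAt p.1 j p.2, p.2 + 1)) (a1, st.2))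
      (ans, i)
    st.1

-- ===== PORT B =====
def pvCell (r c : Int) : Int :=
  if r ≤ c then PySem.Int.floordiv (c * (c + 1)) 2 + (c - r) + 1 else 0

def pattern4_alt (N : Int) : List (List Int) :=
  (PySem.List.pyRange 0 N 1).map (fun r =>
    (PySem.List.pyRange 0 N 1).map (fun c => pvCell r c))

-- ===== PRECONDITION & SPEC =====
-- Pre_ excludes negative N: a degenerate size no specification covers, on which A returns a
-- one-cell grid and B an empty grid, either value being as defensible as the other.
def Pre_pattern4 (N : Int) : Prop := 0 ≤ N
instance (N : Int) : Decidable (Pre_pattern4 N) := by unfold Pre_pattern4; infer_instance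
def pvWitness_pattern4 : Int := (3)

def Spec_pattern4 (N : Int) (out : List (List Int)) : Prop := out = pattern4_alt N
instance (N : Int) (out : List (List Int)) : Decidable (Spec_pattern4 N out) := by unfold Spec_pattern4; infer_instance

-- ===== CLAIM (what is proved, stated in full; the proofs are below) =====
def Claim_equal_pattern4 : Prop := ∀ (N : Int), Dom_pattern4 N → Pre_pattern4 N → Spec_pattern4 N (pattern4 N)

-- ===== LEMMAS AND PROOFS =====

-- the matrix with rows 0..n-1 and columns 0..k-1, every cell given by B's closed form
def pvRows (n k : Nat) : List (List Int) :=
  (List.range n).map (fun (r : Nat) => (List.range k).map (fun (c : Nat) => pvCell (r : Int) (c : Int)))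

-- A's counter value i at the start of outer iteration e = k
def pvCtr (k : Nat) : Int := (((k + 1) * (k + 2) / 2 : Nat) : Int) + 1

-- tag a list of indices with consecutive counter values starting at i0
def pvTag (i0 : Int) : List Int → List (Int × Int)
  | [] => []
  | j :: js => (j, i0) :: pvTag (i0 + 1) js

lemma set_map_range (n j : Nat) (f : Nat → List Int) (g : List Int) :
    ((List.range n).map f).set j g
      = (List.range n).map (fun (r : Nat) => if r = j then g else f r) := by
  apply List.ext_getElem
  · simp
  · intro k h1 h2
    rw [List.getElem_set]
    simp only [List.getElem_map, List.getElem_range]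
    split_ifs <;> first | rfl | omega

lemma appendAt_map_range (n : Nat) (j v : Int) (f : Nat → List Int)
    (h0 : 0 ≤ j) (hj : j.toNat < n) :
    pvAppendAt ((List.range n).map f) j v
      = (List.range n).map (fun (r : Nat) => if (r : Int) = j then f r ++ [v] else f r) := by
  unfold pvAppendAt
  have hg : ((List.range n).map f).getD j.toNat [] = f j.toNat := by
    rw [List.getD_eq_getElem?_getD]
    simp [hj]
  rw [hg, set_map_range n j.toNat f _]
  apply List.map_congr_left
  intro r hr
  have hiff : (r : Int) = j ↔ r = j.toNat := by omega
  simp only [hiff]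
  split_ifs with h <;> simp [h]

lemma foldl_appendAt_pairs (ps : List (Int × Int)) (n : Nat) (f : Nat → List Int)
    (h : ∀ p ∈ ps, 0 ≤ p.1 ∧ p.1 < (n : Int)) :
    ps.foldl (fun a q => pvAppendAt a q.1 q.2) ((List.range n).map f)
      = (List.range n).map
          (fun (r : Nat) => f r ++ (ps.filter (fun q => q.1 = (r : Int))).map Prod.snd) := by
  induction ps generalizing f with
  | nil => simp
  | cons p ps ih =>
    obtain ⟨hp0, hp1⟩ := h p (List.mem_cons_self)
    rw [List.foldl_cons,
        appendAt_map_range n p.1 p.2 f hp0 (by omega),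
        ih _ (fun q hq => h q (List.mem_cons_of_mem _ hq))]
    apply List.map_congr_left
    intro r hr
    by_cases hc : p.1 = (r : Int)
    · rw [if_pos hc.symm, List.filter_cons_of_pos (by simpa using hc), List.map_cons,
          List.append_assoc, List.singleton_append]
    · rw [if_neg (fun h' => hc h'.symm), List.filter_cons_of_neg (by simpa using hc)]

lemma loop2_eq (js : List Int) (a : List (List Int)) (i0 : Int) :
    js.foldl (fun (p : List (List Int) × Int) j => (pvAppendAt p.1 j p.2, p.2 + 1)) (a, i0)
      = ((pvTag i0 js).foldl (fun a q => pvAppendAt a q.1 q.2) a, i0 + js.length) := by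
  induction js generalizing a i0 with
  | nil => simp [pvTag]
  | cons j js ih =>
    rw [List.foldl_cons, ih, pvTag, List.foldl_cons]
    simp
    ring

lemma tag_fst_mem {i0 : Int} {js : List Int} {q : Int × Int} (h : q ∈ pvTag i0 js) :
    q.1 ∈ js := by
  induction js generalizing i0 with
  | nil => simp [pvTag] at h
  | cons j js ih =>
    simp only [pvTag, List.mem_cons] at h ⊢
    rcases h with h | h
    · left; rw [h]
    · right; exact ih h

lemma filter_nodup_eq {l : List Int} (hl : l.Nodup) (r : Int) :
    l.filter (fun j => j = r) = if r ∈ l then [r] else [] := by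
  induction l with
  | nil => simp
  | cons x xs ih =>
    simp only [List.nodup_cons] at hl
    rw [List.filter_cons]
    by_cases hx : x = r
    · subst hx
      simp [hl.1, ih hl.2]
    · have := ih hl.2
      simp [hx, this, Ne.symm hx]

lemma nodup_pyRange_neg_one (a b : Int) : (PySem.List.pyRange a b (-1)).Nodup := by
  rw [PySem.List.pyRange_neg_one_eq_reverse, List.nodup_reverse]
  exact PySem.List.nodup_pyRange_one _ _

-- the 0-appending inner loop, with all indices distinct and in range
lemma foldl_appendAt_const (js : List Int) (v : Int) (n : Nat) (f : Nat → List Int)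
    (hnd : js.Nodup) (h : ∀ j ∈ js, 0 ≤ j ∧ j < (n : Int)) :
    js.foldl (fun a j => pvAppendAt a j v) ((List.range n).map f)
      = (List.range n).map (fun (r : Nat) => f r ++ if (r : Int) ∈ js then [v] else []) := by
  have h1 : js.foldl (fun a j => pvAppendAt a j v) ((List.range n).map f)
      = (js.map (fun j => (j, v))).foldl (fun a q => pvAppendAt a q.1 q.2)
          ((List.range n).map f) := by
    rw [List.foldl_map]
  rw [h1, foldl_appendAt_pairs _ n f (by
    intro p hp
    simp only [List.mem_map] at hp
    obtain ⟨j, hj, rfl⟩ := hp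
    exact h j hj)]
  apply List.map_congr_left
  intro r hr
  congr 1
  rw [List.filter_map]
  have hcomp : ((fun q : Int × Int => decide (q.1 = (r : Int))) ∘ (fun j => (j, v)))
      = fun j : Int => decide (j = (r : Int)) := rfl
  rw [hcomp, filter_nodup_eq hnd (r : Int)]
  split_ifs with hm <;> simp

lemma tag_countdown (k : Nat) : ∀ (i0 r : Int),
    ((pvTag i0 (PySem.List.pyRange (k : Int) (-1) (-1))).filter
        (fun q => q.1 = r)).map Prod.snd
      = if 0 ≤ r ∧ r ≤ (k : Int) then [i0 + ((k : Int) - r)] else [] := by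
  induction k with
  | zero =>
    intro i0 r
    rw [PySem.List.pyRange_neg_one_cons (by norm_num),
        PySem.List.pyRange_neg_one_eq_nil (by norm_num)]
    simp only [pvTag, List.filter_cons]
    by_cases h : (0 : Int) = r
    · simp [← h]
    · have h2 : ¬ (0 ≤ r ∧ r ≤ (0 : Int)) := by omega
      simp [h, h2]
  | succ k ih =>
    intro i0 r
    have hc : ((k + 1 : Nat) : Int) = (k : Int) + 1 := by push_cast; ring
    rw [hc, PySem.List.pyRange_neg_one_cons (by omega),
        show (k : Int) + 1 - 1 = (k : Int) by ring]
    simp only [pvTag, List.filter_cons]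
    by_cases h : (k : Int) + 1 = r
    · have h2 : ¬ (0 ≤ r ∧ r ≤ (k : Int)) := by omega
      have h3 : (0 ≤ r ∧ r ≤ (k : Int) + 1) := by omega
      rw [if_pos (by simpa using h), List.map_cons, ih (i0 + 1) r, if_neg h2, if_pos h3, ← h]
      norm_num
    · by_cases h3 : 0 ≤ r ∧ r ≤ (k : Int)
      · have h4 : 0 ≤ r ∧ r ≤ (k : Int) + 1 := by omega
        simp [h, h3, h4, ih]
        ring
      · have h4 : ¬ (0 ≤ r ∧ r ≤ (k : Int) + 1) := by omega
        simp [h, h3, h4, ih]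

-- the counter-appending inner loop: rows 0..K each receive one value, counting up from the bottom row
lemma loop2_countdown (K n : Nat) (f : Nat → List Int) (i0 : Int) (hK : K < n) :
    (PySem.List.pyRange (K : Int) (-1) (-1)).foldl
        (fun (p : List (List Int) × Int) j => (pvAppendAt p.1 j p.2, p.2 + 1))
        ((List.range n).map f, i0)
      = ((List.range n).map (fun (r : Nat) => f r ++
            if (r : Int) ≤ (K : Int) then [i0 + ((K : Int) - (r : Int))] else []),
          i0 + (K + 1)) := by
  rw [loop2_eq, foldl_appendAt_pairs _ n f (by
    intro p hp
    have := tag_fst_mem hp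
    rw [PySem.List.mem_pyRange_neg_one] at this
    constructor <;> omega)]
  rw [Prod.mk.injEq]
  constructor
  · apply List.map_congr_left
    intro r hr
    rw [tag_countdown K i0 (r : Int)]
    have : (0 ≤ (r : Int) ∧ (r : Int) ≤ (K : Int)) ↔ (r : Int) ≤ (K : Int) := by omega
    simp only [this]
  · rw [PySem.List.length_pyRange_neg_one]
    omega

lemma cell_succ_formula (r k : Nat) (hr : (r : Int) ≤ (k : Int) + 1) :
    pvCell (r : Int) ((k : Int) + 1) = pvCtr k + ((k : Int) + 1 - (r : Int)) := by
  unfold pvCell pvCtr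
  rw [if_pos hr, PySem.Int.floordiv_eq_ediv_of_pos (by norm_num)]
  have h1 : ((k : Int) + 1) * ((k : Int) + 1 + 1) = (((k + 1) * (k + 2) : Nat) : Int) := by
    push_cast; ring
  rw [h1]
  omega

lemma ctr_step (k : Nat) : pvCtr k + ((k : Int) + 1 + 1) = pvCtr (k + 1) := by
  unfold pvCtr
  have h : (k + 2) * (k + 3) = (k + 1) * (k + 2) + 2 * (k + 2) := by ring
  have h2 : (k + 2) * (k + 3) / 2 = (k + 1) * (k + 2) / 2 + (k + 2) := by omega
  push_cast [h2]
  ring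

-- effect of one outer iteration e = k on the canonical state (matrix size m+1)
lemma outer_step (m k : Nat) (hk : k < m) :
    ((PySem.List.pyRange ((k : Int) + 1) (-1) (-1)).foldl
        (fun (p : List (List Int) × Int) j => (pvAppendAt p.1 j p.2, p.2 + 1))
        (((PySem.List.pyRange ((m : Nat) : Int) ((k : Int) + 1) (-1)).foldl
            (fun a j => pvAppendAt a j 0) (pvRows (m + 1) (k + 1))), pvCtr k))
      = (pvRows (m + 1) (k + 2), pvCtr (k + 1)) := by
  unfold pvRows
  rw [foldl_appendAt_const _ 0 (m + 1) _ (nodup_pyRange_neg_one _ _) (by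
    intro j hj
    rw [PySem.List.mem_pyRange_neg_one] at hj
    constructor <;> omega)]
  rw [show ((k : Int) + 1) = (((k + 1 : Nat) : Int)) by push_cast; ring,
      loop2_countdown (k + 1) (m + 1) _ (pvCtr k) (by omega)]
  have hctr : pvCtr k + (((k + 1 : Nat) : Nat) + 1) = pvCtr (k + 1) := by
    have := ctr_step k
    push_cast at this ⊢
    linarith
  rw [hctr]
  congr 1
  apply List.map_congr_left
  intro r hr
  simp only [List.mem_range] at hr
  conv_rhs => rw [show k + 2 = (k + 1) + 1 from rfl, List.range_succ, List.map_append,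
    List.map_cons, List.map_nil]
  by_cases hc : (r : Int) ≤ ((k + 1 : Nat) : Int)
  · have hm : ¬ ((r : Int) ∈ PySem.List.pyRange ((m : Nat) : Int) (((k + 1 : Nat) : Int)) (-1)) := by
      rw [PySem.List.mem_pyRange_neg_one]
      push_cast at hc ⊢
      omega
    have hf := cell_succ_formula r k (by push_cast at hc ⊢; omega)
    rw [if_neg hm, if_pos hc]
    push_cast at hf ⊢
    rw [hf]
    simp
  · have hm : (r : Int) ∈ PySem.List.pyRange ((m : Nat) : Int) (((k + 1 : Nat) : Int)) (-1) := by
      rw [PySem.List.mem_pyRange_neg_one]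
      push_cast at hc ⊢
      omega
    have hcell : pvCell (r : Int) (((k + 1 : Nat) : Int)) = 0 := by
      unfold pvCell
      rw [if_neg (by push_cast at hc ⊢; omega)]
    rw [if_pos hm, if_neg hc]
    push_cast at hcell ⊢
    rw [hcell]
    simp

lemma outer_inv (m : Nat) : ∀ k, k ≤ m →
    (PySem.List.pyRange 0 (k : Int) 1).foldl
      (fun (st : List (List Int) × Int) e =>
        let a1 := (PySem.List.pyRange ((m : Nat) : Int) (e + 1) (-1)).foldl
          (fun a j => pvAppendAt a j 0) st.1
        (PySem.List.pyRange (e + 1) (-1) (-1)).foldl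
          (fun (p : List (List Int) × Int) j => (pvAppendAt p.1 j p.2, p.2 + 1)) (a1, st.2))
      (pvRows (m + 1) 1, 2)
      = (pvRows (m + 1) (k + 1), pvCtr k) := by
  intro k
  induction k with
  | zero =>
    intro _
    rw [PySem.List.pyRange_one_eq_nil (by norm_num)]
    simp [pvCtr]
  | succ k ih =>
    intro hk
    rw [show ((k + 1 : Nat) : Int) = (k : Int) + 1 by push_cast; ring,
        PySem.List.pyRange_one_succ_right (by positivity),
        List.foldl_append, ih (by omega)]
    simp only [List.foldl_cons, List.foldl_nil]
    exact outer_step m k (by omega)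

lemma base_state (m : Nat) :
    [[(1 : Int)]] ++ List.replicate m [(0 : Int)] = pvRows (m + 1) 1 := by
  unfold pvRows
  apply List.ext_getElem
  · simp
  · intro k h1 h2
    simp only [List.getElem_map, List.getElem_range, List.range_one, List.map_cons,
      List.map_nil]
    cases k with
    | zero =>
      simp [pvCell]
    | succ k =>
      simp only [List.cons_append, List.nil_append, List.getElem_cons_succ]
      rw [List.getElem_replicate]
      simp [pvCell]

lemma append_loop (l : List Int) (a : List (List Int)) :
    l.foldl (fun a _ => a ++ [[(0 : Int)]]) a = a ++ List.replicate l.length [0] := by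
  induction l generalizing a with
  | nil => simp
  | cons x xs ih =>
    rw [List.foldl_cons, ih, List.length_cons, List.append_assoc, List.singleton_append,
        ← List.replicate_succ]

lemma alt_eq_rows (m : Nat) :
    pattern4_alt ((m + 1 : Nat) : Int) = pvRows (m + 1) (m + 1) := by
  unfold pattern4_alt
  rw [PySem.List.pyRange_zero_natCast]
  unfold pvRows
  simp only [List.map_map]
  rfl

lemma a_eq_rows (m : Nat) :
    pattern4 ((m + 1 : Nat) : Int) = pvRows (m + 1) (m + 1) := by
  unfold pattern4
  rw [if_neg (by push_cast; omega)]
  show ((PySem.List.pyRange 0 (((m + 1 : Nat) : Int) - 1) 1).foldl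
      (fun (st : List (List Int) × Int) e =>
        let a1 := (PySem.List.pyRange (((m + 1 : Nat) : Int) - 1) (e + 1) (-1)).foldl
          (fun a j => pvAppendAt a j 0) st.1
        (PySem.List.pyRange (e + 1) (-1) (-1)).foldl
          (fun (p : List (List Int) × Int) j => (pvAppendAt p.1 j p.2, p.2 + 1)) (a1, st.2))
      ((PySem.List.pyRange 0 (((m + 1 : Nat) : Int) - 1) 1).foldl (fun a _ => a ++ [[0]]) [[1]], 2)).1
    = pvRows (m + 1) (m + 1)
  rw [show (((m + 1 : Nat) : Int) - 1) = ((m : Nat) : Int) by push_cast; ring,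
      append_loop, PySem.List.length_pyRange_one]
  rw [show (((m : Nat) : Int) - 0).toNat = m by omega, base_state m,
      outer_inv m m (le_refl m)]

-- ===== VERDICT (by name: the statement is the Claim_ definition above) =====
theorem pattern4_spec : Claim_equal_pattern4 := by
  intro N _ hpre
  unfold Spec_pattern4
  rcases eq_or_lt_of_le hpre with h | h
  · rw [← h]; decide
  · obtain ⟨m, rfl⟩ : ∃ m : Nat, N = ((m + 1 : Nat) : Int) := ⟨(N - 1).toNat, by omega⟩
    rw [a_eq_rows m, alt_eq_rows m]
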